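-- pv_equiv track=rewrite | github.com/justjacobrosario/BS_Computer_Science_UPD_Repo | 1st Year 1st Sem/python test drive/useful_dictionaries/dict_aggregation.py | aggregate_transactions
-- ===== SOURCE A (Python) =====
-- def aggregate_transactions(seq):
--     dic = {}
--     for name, num in seq:
--         if name not in dic:
--             dic.update({name : { "count" : 1, "total" : num}})
--         else:
--             dic[name]["count"] += 1
--             dic[name]["total"] += num
--
--     return dic
-- ===== SOURCE B (Python) =====
-- def aggregate_transactions(seq):
--     # two-stage brute force: first collect names in first-occurrence order,
--     # then scan seq once per name to compute its count and total
--     names = []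
--     for name, _ in seq:
--         if name not in names:
--             names.append(name)
--     return {name: {"count": sum(1 for n, _ in seq if n == name),
--                    "total": sum(v for n, v in seq if n == name)}
--             for name in names}
-- ===== Notes on version B (the rewrite author's own statement) =====
-- stated objective: alternative
-- what changed: B drops A's single-pass mutable accumulator dict entirely: it first collects the distinct names in first-occurrence order into a list, then answers each name by scanning seq again with generator sums (one full scan per distinct name), assembling the result in a comprehension.
import Mathlib
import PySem

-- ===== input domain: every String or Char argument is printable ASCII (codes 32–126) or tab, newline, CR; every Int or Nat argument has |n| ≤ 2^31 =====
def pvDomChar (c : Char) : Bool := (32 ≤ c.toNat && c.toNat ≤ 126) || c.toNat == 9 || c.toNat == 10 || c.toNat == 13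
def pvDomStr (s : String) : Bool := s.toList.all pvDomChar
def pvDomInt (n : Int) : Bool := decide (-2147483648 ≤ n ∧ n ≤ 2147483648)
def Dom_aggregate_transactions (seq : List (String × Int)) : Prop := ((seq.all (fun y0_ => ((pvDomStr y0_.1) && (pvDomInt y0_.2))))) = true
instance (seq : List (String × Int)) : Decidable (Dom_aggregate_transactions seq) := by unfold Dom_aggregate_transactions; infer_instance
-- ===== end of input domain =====

-- B replaces A's single-pass mutable accumulator dict with a two-stage brute force:
-- collect first-occurrence names, then re-scan seq per name (objective: alternative, not faster).

-- ===== PORT A =====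
-- loop body of A: branch on membership, insert a fresh inner dict or mutate the existing one
def aggStepA (dic : PySem.Dict String (PySem.Dict String Int)) (p : String × Int) :
    PySem.Dict String (PySem.Dict String Int) :=
  if !(dic.contains p.1) then
    dic.insert p.1 (PySem.Dict.mk [("count", (1 : Int)), ("total", p.2)])
  else
    (dic.modify p.1 PySem.Dict.empty (fun inner => inner.modify "count" 0 (· + 1))).modify
      p.1 PySem.Dict.empty (fun inner => inner.modify "total" 0 (· + p.2))

def aggregate_transactions (seq : List (String × Int)) : List (String × List (String × Int)) :=
  ((seq.foldl aggStepA PySem.Dict.empty).items).map (fun kv => (kv.1, kv.2.items))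

-- ===== PORT B =====
def aggregate_transactions_alt (seq : List (String × Int)) : List (String × List (String × Int)) :=
  -- stage 1: names in first-occurrence order
  let names := seq.foldl (fun ns p => if ns.contains p.1 then ns else ns ++ [p.1]) ([] : List String)
  -- stage 2: one full scan of seq per name ('sum(1 for …)' / 'sum(v for …)' as folds)
  names.map (fun name =>
    (name, [("count", seq.foldl (fun s p => if p.1 == name then s + 1 else s) (0 : Int)),
            ("total", seq.foldl (fun s p => if p.1 == name then s + p.2 else s) (0 : Int))]))

-- ===== PRECONDITION & SPEC =====
def Spec_aggregate_transactions (seq : List (String × Int)) (out : List (String × List (String × Int))) : Prop := out = aggregate_transactions_alt seq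
instance (seq : List (String × Int)) (out : List (String × List (String × Int))) : Decidable (Spec_aggregate_transactions seq out) := by unfold Spec_aggregate_transactions; infer_instance

-- ===== CLAIM (what is proved, stated in full; the proofs are below) =====
def Claim_equal_aggregate_transactions : Prop := ∀ (seq : List (String × Int)), Dom_aggregate_transactions seq → Spec_aggregate_transactions seq (aggregate_transactions seq)

-- ===== LEMMAS AND PROOFS =====

-- mutating the inner dict literal: the two += statements keep the item order
theorem inner_bump (c t d : Int) :
    ((PySem.Dict.mk [("count", c), ("total", t)]).modify "count" 0 (· + 1)).modify "total" 0 (· + d)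
      = PySem.Dict.mk [("count", c + 1), ("total", t + d)] := by
  rfl

-- main invariant: A's folded dict vs B's stage-1 name list and stage-2 per-name scans,
-- with c/t the per-name values already accumulated in dic
theorem main_invariant (seq : List (String × Int))
    (dic : PySem.Dict String (PySem.Dict String Int)) (c t : String → Int)
    (hnd : dic.keys.Nodup)
    (hget : ∀ k ∈ dic.keys, dic.getD k PySem.Dict.empty
        = PySem.Dict.mk [("count", c k), ("total", t k)]) :
    ((seq.foldl aggStepA dic).items).map (fun kv => (kv.1, kv.2.items))
      = (seq.foldl (fun ns p => if ns.contains p.1 then ns else ns ++ [p.1]) dic.keys).map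
          (fun name =>
            (name, [("count", seq.foldl (fun s p => if p.1 == name then s + 1 else s)
                       (if dic.contains name then c name else 0)),
                    ("total", seq.foldl (fun s p => if p.1 == name then s + p.2 else s)
                       (if dic.contains name then t name else 0))])) := by
  induction seq generalizing dic c t with
  | nil =>
      simp only [List.foldl]
      rw [PySem.Dict.items_eq_map_keys dic hnd PySem.Dict.empty, List.map_map]
      refine List.map_congr_left (fun k hk => ?_)
      have hc : dic.contains k = true := (PySem.Dict.contains_iff_mem_keys _ _).2 hk
      simp [Function.comp, hget k hk, hc]
  | cons p rest ih =>
      obtain ⟨name, num⟩ := p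
      simp only [List.foldl]
      by_cases hm : dic.contains name = true
      · -- name already present: A mutates the inner dict in place
        have hkmem : name ∈ dic.keys := (PySem.Dict.contains_iff_mem_keys _ _).1 hm
        have hstep : aggStepA dic (name, num)
            = (dic.modify name PySem.Dict.empty (fun inner => inner.modify "count" 0 (· + 1))).modify
                name PySem.Dict.empty (fun inner => inner.modify "total" 0 (· + num)) := by
          simp [aggStepA, hm]
        have hc2 : (dic.modify name PySem.Dict.empty
            (fun inner => inner.modify "count" 0 (· + 1))).contains name = true := by
          simp [PySem.Dict.contains_modify]
        have hkeys : (aggStepA dic (name, num)).keys = dic.keys := by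
          rw [hstep, PySem.Dict.keys_modify, PySem.Dict.keys_insert_of_contains _ _ hc2,
            PySem.Dict.keys_modify, PySem.Dict.keys_insert_of_contains _ _ hm]
        rw [show (if dic.keys.contains name then dic.keys else dic.keys ++ [name]) = dic.keys by
          simp [hkmem]]
        rw [show dic.keys = (aggStepA dic (name, num)).keys from hkeys.symm]
        rw [ih (aggStepA dic (name, num))
          (fun k => if k = name then c k + 1 else c k)
          (fun k => if k = name then t k + num else t k)
          (hkeys ▸ hnd)
          (by
            intro k hk
            rw [hkeys] at hk
            rw [hstep]
            by_cases hkn : k = name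
            · subst hkn
              rw [PySem.Dict.getD_modify_self, PySem.Dict.getD_modify_self, hget k hkmem]
              simp [inner_bump]
            · rw [PySem.Dict.getD_modify_of_ne _ _ _ hkn, PySem.Dict.getD_modify_of_ne _ _ _ hkn]
              simp [hkn, hget k hk])]
        refine List.map_congr_left (fun nm _ => ?_)
        have hcont : (aggStepA dic (name, num)).contains nm = dic.contains nm := by
          rcases h : dic.contains nm with _ | _
          · rcases h2 : (aggStepA dic (name, num)).contains nm with _ | _
            · rfl
            · exact absurd (hkeys ▸ (PySem.Dict.contains_iff_mem_keys _ _).1 h2)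
                (fun hmem => by simp [(PySem.Dict.contains_iff_mem_keys _ _).2 hmem] at h)
          · exact ((PySem.Dict.contains_iff_mem_keys _ _).2
              (hkeys ▸ (PySem.Dict.contains_iff_mem_keys _ _).1 h)).symm ▸ rfl
        by_cases hnn : nm = name
        · subst hnn; simp [hcont, hm]
        · have : ¬ (name == nm) = true := fun h => hnn ((beq_iff_eq.1 h)).symm
          simp [hcont, hnn, this]
      · -- fresh name: A inserts a new inner dict
        have hmf : dic.contains name = false := by simpa using hm
        have hnm : name ∉ dic.keys := fun h => hm ((PySem.Dict.contains_iff_mem_keys _ _).2 h)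
        have hstep : aggStepA dic (name, num)
            = dic.insert name (PySem.Dict.mk [("count", (1 : Int)), ("total", num)]) := by
          simp [aggStepA, hmf]
        have hkeys : (aggStepA dic (name, num)).keys = dic.keys ++ [name] := by
          rw [hstep, PySem.Dict.keys_insert_of_not_contains _ _ hmf]
        rw [show (if dic.keys.contains name then dic.keys else dic.keys ++ [name])
            = dic.keys ++ [name] by simp [hnm]]
        rw [show dic.keys ++ [name] = (aggStepA dic (name, num)).keys from hkeys.symm]
        rw [ih (aggStepA dic (name, num))
          (fun k => if k = name then 1 else c k)
          (fun k => if k = name then num else t k)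
          (by rw [hkeys]; exact hnd.append (List.nodup_singleton _) (by simpa using hnm))
          (by
            intro k hk
            rw [hstep]
            by_cases hkn : k = name
            · subst hkn; simp [PySem.Dict.getD_insert_self]
            · rw [PySem.Dict.getD_insert_of_ne _ _ _ hkn]
              rw [hkeys] at hk
              have hk' : k ∈ dic.keys := by
                rcases List.mem_append.1 hk with h | h
                · exact h
                · exact absurd (List.mem_singleton.1 h) hkn
              simp [hkn, hget k hk'])]
        refine List.map_congr_left (fun nm _ => ?_)
        have hcont : (aggStepA dic (name, num)).contains nm
            = (if nm = name then true else dic.contains nm) := by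
          rw [hstep, PySem.Dict.contains_insert]
          by_cases hnn : nm = name <;> simp [hnn]
        by_cases hnn : nm = name
        · subst hnn; simp [hcont, hmf]
        · have : ¬ (name == nm) = true := fun h => hnn ((beq_iff_eq.1 h)).symm
          simp [hcont, hnn, this]

-- ===== VERDICT (by name: the statement is the Claim_ definition above) =====
theorem aggregate_transactions_spec : Claim_equal_aggregate_transactions := by
  intro seq _
  unfold Spec_aggregate_transactions aggregate_transactions aggregate_transactions_alt
  have h := main_invariant seq PySem.Dict.empty (fun _ => 0) (fun _ => 0) (by simp) (by simp)
  simpa using h
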